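-- pv_equiv track=rewrite | github.com/theri6v/CodeSprintSolutions | GeekForGeek/Problem Of The Day/Maximum People Visible in a Line.py | maxPeople
-- ===== SOURCE A (Python) =====
-- def maxPeople(arr):
--     n = len(arr)
--
--     if n == 0:
--         return 0
--
--     l = [-1] * n
--     s = []
--
--     for i in range(n):
--         c = 0
--         while s and arr[s[-1]] < arr[i]:
--             s.pop()
--         l[i] = s[-1] if s else -1
--         s.append(i)
--
--     r = [n] * n
--     s.clear()
--
--     for i in range(n-1, -1, -1):
--         c = 0
--         while s and arr[s[-1]] < arr[i]:
--             s.pop()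
--         r[i] = s[-1] if s else n
--         s.append(i)
--
--     a = 0
--
--     for i in range(n):
--         a = max(a, r[i] - l[i] - 1)
--     return a
-- ===== SOURCE B (Python) =====
-- def maxPeople(arr):
--     n = len(arr)
--     a = 0
--     for i in range(n):
--         l = -1
--         for j in range(i - 1, -1, -1):
--             if arr[j] >= arr[i]:
--                 l = j
--                 break
--         r = n
--         for j in range(i + 1, n):
--             if arr[j] >= arr[i]:
--                 r = j
--                 break
--         a = max(a, r - l - 1)
--     return a
-- ===== Notes on version B (the rewrite author's own statement) =====
-- stated objective: simpler
-- what changed: Replaced A's two monotonic-stack passes plus stored l/r arrays by, for each index, a direct backward/forward scan for the nearest element >= arr[i] (sentinels -1/n), folding the max in one loop.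
import Mathlib
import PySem

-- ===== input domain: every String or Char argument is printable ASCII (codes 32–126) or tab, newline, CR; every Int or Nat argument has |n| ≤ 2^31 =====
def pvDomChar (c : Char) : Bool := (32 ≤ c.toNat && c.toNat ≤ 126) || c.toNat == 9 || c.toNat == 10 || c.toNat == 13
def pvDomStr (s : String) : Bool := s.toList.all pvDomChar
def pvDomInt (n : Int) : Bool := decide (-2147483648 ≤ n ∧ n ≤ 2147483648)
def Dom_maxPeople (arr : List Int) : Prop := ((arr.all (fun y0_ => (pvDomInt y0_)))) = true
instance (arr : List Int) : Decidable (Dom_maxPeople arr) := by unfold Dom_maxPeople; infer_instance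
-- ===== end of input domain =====

-- B replaces A's two monotonic-stack passes by direct nearest-taller-neighbour scans per index (simpler, same results on all inputs).

-- ===== PORT A =====
-- Python list used as a stack of indices; head = Python's s[-1] (top).
-- 'while s and arr[s[-1]] < arr[i]: s.pop()'
def popWhile (arr : List Int) (x : Int) : List Nat → List Nat
  | [] => []
  | t :: rest => if PySem.List.pyGetD arr (t : Int) 0 < x then popWhile arr x rest else t :: rest

-- 's[-1] if s else d'
def topD (d : Int) : List Nat → Int
  | [] => d
  | t :: _ => (t : Int)

-- body of A's first loop: pop, record l[i], push i (l built in index order)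
def lstep (arr : List Int) (st : List Int × List Nat) (i : Nat) : List Int × List Nat :=
  let ai := PySem.List.pyGetD arr (i : Int) 0
  let s' := popWhile arr ai st.2
  (st.1 ++ [topD (-1) s'], i :: s')

-- body of A's second loop (i descending): pop, record r[i], push i (prepend keeps index order)
def rstep (arr : List Int) (st : List Int × List Nat) (i : Nat) : List Int × List Nat :=
  let ai := PySem.List.pyGetD arr (i : Int) 0
  let s' := popWhile arr ai st.2
  (topD (arr.length : Int) s' :: st.1, i :: s')

def maxPeople (arr : List Int) : Int :=
  let n := arr.length
  if n = 0 then 0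
  else
    let l := ((List.range n).foldl (lstep arr) ([], [])).1
    let r := ((List.range n).reverse.foldl (rstep arr) ([], [])).1
    (List.range n).foldl (fun (a : Int) (i : Nat) => max a (PySem.List.pyGetD r (i : Int) 0 - PySem.List.pyGetD l (i : Int) 0 - 1)) 0

-- ===== PORT B =====
-- 'for j in range(i-1,-1,-1): if arr[j] >= x: l = j; break' (else -1)
def scanDown (arr : List Int) (x : Int) : Nat → Int
  | 0 => -1
  | j + 1 => if PySem.List.pyGetD arr (j : Int) 0 ≥ x then (j : Int) else scanDown arr x j

-- 'for j in range(i+1,n): if arr[j] >= x: r = j; break' (else n)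
def scanUp (arr : List Int) (n : Nat) (x : Int) (j : Nat) : Int :=
  if _h : j < n then
    if PySem.List.pyGetD arr (j : Int) 0 ≥ x then (j : Int) else scanUp arr n x (j + 1)
  else (n : Int)
termination_by n - j

def maxPeople_alt (arr : List Int) : Int :=
  let n := arr.length
  (List.range n).foldl (fun (a : Int) (i : Nat) =>
      let ai := PySem.List.pyGetD arr (i : Int) 0
      max a (scanUp arr n ai (i + 1) - scanDown arr ai i - 1)) 0

-- ===== PRECONDITION & SPEC =====
def Spec_maxPeople (arr : List Int) (out : Int) : Prop := out = maxPeople_alt arr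
instance (arr : List Int) (out : Int) : Decidable (Spec_maxPeople arr out) := by unfold Spec_maxPeople; infer_instance

-- ===== CLAIM (what is proved, stated in full; the proofs are below) =====
def Claim_equal_maxPeople : Prop := ∀ (arr : List Int), Dom_maxPeople arr → Spec_maxPeople arr (maxPeople arr)

-- ===== LEMMAS AND PROOFS =====

theorem popWhile_popWhile (arr : List Int) {x y : Int} (h : y ≤ x) (s : List Nat) :
    popWhile arr x (popWhile arr y s) = popWhile arr x s := by
  induction s with
  | nil => rfl
  | cons t rest ih =>
    by_cases h1 : PySem.List.pyGetD arr (t : Int) 0 < y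
    · simp only [popWhile, if_pos h1, if_pos (lt_of_lt_of_le h1 h), ih]
    · simp only [popWhile, if_neg h1]

-- left-pass invariant: the stack answers every "nearest index < m with value ≥ x" query,
-- and the accumulated list is exactly B's scanDown values.
theorem left_inv (arr : List Int) (m : Nat) :
    (∀ x, topD (-1) (popWhile arr x (((List.range m).foldl (lstep arr) ([], [])).2)) = scanDown arr x m) ∧
    ((List.range m).foldl (lstep arr) ([], [])).1 =
      (List.range m).map (fun (i : Nat) => scanDown arr (PySem.List.pyGetD arr (i : Int) 0) i) := by
  induction m with
  | zero => exact ⟨fun x => rfl, rfl⟩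
  | succ m ih =>
    obtain ⟨hs, hl⟩ := ih
    rw [List.range_succ, List.foldl_append, List.map_append]
    constructor
    · intro x
      simp only [List.foldl_cons, List.foldl_nil, lstep]
      by_cases hc : PySem.List.pyGetD arr (m : Int) 0 < x
      · simp only [popWhile, if_pos hc, popWhile_popWhile arr (le_of_lt hc), hs x, scanDown,
          if_neg (not_le.mpr hc)]
      · simp only [popWhile, if_neg hc, topD, scanDown, if_pos (not_lt.mp hc)]
    · simp only [List.foldl_cons, List.foldl_nil, lstep, hl, List.map_cons, List.map_nil,
        hs (PySem.List.pyGetD arr (m : Int) 0)]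

-- right-pass invariant, processing indices m-1 … 0 from an arbitrary state whose stack
-- answers "nearest index ≥ m with value ≥ x" queries.
theorem right_inv (arr : List Int) (m : Nat) (hm : m ≤ arr.length) :
    ∀ (s : List Nat) (racc : List Int),
      (∀ x, topD (arr.length : Int) (popWhile arr x s) = scanUp arr arr.length x m) →
      (((List.range m).reverse.foldl (rstep arr) (racc, s)).1 =
        (List.range m).map (fun (i : Nat) => scanUp arr arr.length (PySem.List.pyGetD arr (i : Int) 0) (i + 1)) ++ racc) := by
  induction m with
  | zero => intro s racc _; rfl
  | succ m ih =>
    intro s racc hs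
    have hmn : m < arr.length := hm
    have hstep : ∀ x, topD (arr.length : Int) (popWhile arr x ((rstep arr (racc, s) m).2)) =
        scanUp arr arr.length x m := by
      intro x
      simp only [rstep]
      by_cases hc : PySem.List.pyGetD arr (m : Int) 0 < x
      · rw [scanUp, dif_pos hmn, if_neg (not_le.mpr hc)]
        simp only [popWhile, if_pos hc, popWhile_popWhile arr (le_of_lt hc), hs x]
      · rw [scanUp, dif_pos hmn, if_pos (not_lt.mp hc)]
        simp only [popWhile, if_neg hc, topD]
    have hrev : (List.range (m + 1)).reverse = m :: (List.range m).reverse := by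
      simp [List.range_succ]
    rw [hrev, List.foldl_cons, ih (le_of_lt hmn) _ _ hstep]
    simp only [rstep, hs (PySem.List.pyGetD arr (m : Int) 0)]
    rw [List.range_succ, List.map_append, List.append_assoc]
    rfl

-- ===== VERDICT (by name: the statement is the Claim_ definition above) =====
theorem maxPeople_spec : Claim_equal_maxPeople := by
  intro arr _
  unfold Spec_maxPeople maxPeople maxPeople_alt
  by_cases h0 : arr.length = 0
  · simp [h0]
  · rw [if_neg h0]
    have hl := (left_inv arr arr.length).2
    have hr := right_inv arr arr.length le_rfl [] [] (by
      intro x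
      show topD (arr.length : Int) [] = scanUp arr arr.length x arr.length
      rw [scanUp, dif_neg (lt_irrefl arr.length)]
      rfl)
    rw [List.append_nil] at hr
    rw [hl, hr]
    refine PySem.List.foldl_congr_mem _ _ _ _ (fun a i hi => ?_)
    have hiz : i < arr.length := List.mem_range.mp hi
    rw [PySem.List.pyGetD_natCast, PySem.List.pyGetD_natCast,
      PySem.List.getD_map_range _ _ _ _ hiz, PySem.List.getD_map_range _ _ _ _ hiz]
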